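-- pv_equiv track=rewrite | github.com/desicomments4-ai/mumbai-rent-app | app.py | proximity_score
-- ===== SOURCE A (Python) =====
-- western = ["Bandra","Khar","Santacruz","Andheri","Jogeshwari","Goregaon","Malad","Kandivali","Borivali","Dahisar","Mira Road","Bhayander","Vasai","Naigaon","Nalasopara","Virar"]
--
-- central = ["Dadar","Matunga","Sion","Kurla","Ghatkopar","Vikhroli","Bhandup","Mulund","Thane","Kalwa","Mumbra","Diva","Dombivli","Kalyan","Ambernath","Badlapur","Vangani","Titwala"]
--
-- harbour = ["Chembur","Govandi","Mankhurd"]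
--
-- south   = ["Lower Parel","Worli","Prabhadevi","Mahim","Wadala","Cuffe Parade","Malabar Hill","Colaba"]
--
-- navi    = ["Vashi","Airoli","Kopar Khairane","Ghansoli","Turbhe","Sanpada","Seawoods","Nerul","Belapur","Kharghar","Kamothe","Ulwe","New Panvel","Panvel","Taloja"]
--
-- def _first_idx(area_lower:str, names:list[str]):
--   for i,name in enumerate(names):
--     if name.lower() in area_lower: return i
--   return None
--
-- def proximity_score(area:str, region:str)->int:
--   a = (area or "").lower(); r = (region or "").lower()
--   if "south" in r or any(k.lower() in a for k in south):
--     i=_first_idx(a,south);  return i if i is not None else 0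
--   if "western" in r or any(k.lower() in a for k in western):
--     i=_first_idx(a,western);return i if i is not None else 50
--   if "central" in r or any(k.lower() in a for k in central):
--     i=_first_idx(a,central);return i if i is not None else 50
--   if "harbour" in r or "chembur" in a:
--     i=_first_idx(a,harbour);return i if i is not None else 30
--   if "navi" in r or any(k.lower() in a for k in navi):
--     i=_first_idx(a,navi);   return i if i is not None else 40
--   return 60
-- ===== SOURCE B (Python) =====
-- western = ["Bandra","Khar","Santacruz","Andheri","Jogeshwari","Goregaon","Malad","Kandivali","Borivali","Dahisar","Mira Road","Bhayander","Vasai","Naigaon","Nalasopara","Virar"]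
-- central = ["Dadar","Matunga","Sion","Kurla","Ghatkopar","Vikhroli","Bhandup","Mulund","Thane","Kalwa","Mumbra","Diva","Dombivli","Kalyan","Ambernath","Badlapur","Vangani","Titwala"]
-- harbour = ["Chembur","Govandi","Mankhurd"]
-- south   = ["Lower Parel","Worli","Prabhadevi","Mahim","Wadala","Cuffe Parade","Malabar Hill","Colaba"]
-- navi    = ["Vashi","Airoli","Kopar Khairane","Ghansoli","Turbhe","Sanpada","Seawoods","Nerul","Belapur","Kharghar","Kamothe","Ulwe","New Panvel","Panvel","Taloja"]
--
-- # priority-ordered categories: (region keyword, name list, default score)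
-- _CATS = [("south", south, 0), ("western", western, 50), ("central", central, 50),
--          ("harbour", harbour, 30), ("navi", navi, 40)]
--
-- # one flat keyword index over all categories: (lowercase name, category rank, index in its list)
-- _FLAT = [(name.lower(), c, i)
--          for c, (_kw, names, _d) in enumerate(_CATS)
--          for i, name in enumerate(names)]
--
-- def proximity_score(area: str, region: str) -> int:
--     a = (area or "").lower()
--     r = (region or "").lower()
--     # single flat scan: first matching index per category
--     first = {}
--     for low, c, i in _FLAT:
--         if c not in first and low in a:
--             first[c] = i
--     # active categories, in priority order (harbour is area-triggered only by 'chembur')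
--     hits = [c for c, (kw, _names, _d) in enumerate(_CATS)
--             if kw in r or (("chembur" in a) if kw == "harbour" else c in first)]
--     if not hits:
--         return 60
--     c = hits[0]
--     return first.get(c, _CATS[c][2])
-- ===== Notes on version B (the rewrite author's own statement) =====
-- stated objective: alternative
-- what changed: Replaces A's five-branch cascade (each re-scanning its list via any() plus _first_idx) with a different pipeline: one flat scan over a single combined keyword index builds a category->first-index dict, a comprehension then selects the active categories in priority order, and a single dict lookup with a per-category default yields the score.
import Mathlib
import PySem

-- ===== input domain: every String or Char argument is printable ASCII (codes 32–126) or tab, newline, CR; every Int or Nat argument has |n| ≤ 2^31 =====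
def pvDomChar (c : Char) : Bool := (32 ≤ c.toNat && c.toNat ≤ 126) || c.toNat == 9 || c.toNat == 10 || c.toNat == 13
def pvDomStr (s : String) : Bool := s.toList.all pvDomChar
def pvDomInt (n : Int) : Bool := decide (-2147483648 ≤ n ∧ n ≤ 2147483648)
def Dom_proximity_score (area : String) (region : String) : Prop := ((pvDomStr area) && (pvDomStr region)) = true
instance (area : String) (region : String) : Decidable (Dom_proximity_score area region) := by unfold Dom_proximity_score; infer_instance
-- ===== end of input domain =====

-- B replaces A's branch cascade by a flat keyword index + dict + priority selection (alternative decomposition, same cost).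

-- ===== PORT A =====
def pvSouth : List String := ["Lower Parel","Worli","Prabhadevi","Mahim","Wadala","Cuffe Parade","Malabar Hill","Colaba"]
def pvWestern : List String := ["Bandra","Khar","Santacruz","Andheri","Jogeshwari","Goregaon","Malad","Kandivali","Borivali","Dahisar","Mira Road","Bhayander","Vasai","Naigaon","Nalasopara","Virar"]
def pvCentral : List String := ["Dadar","Matunga","Sion","Kurla","Ghatkopar","Vikhroli","Bhandup","Mulund","Thane","Kalwa","Mumbra","Diva","Dombivli","Kalyan","Ambernath","Badlapur","Vangani","Titwala"]
def pvHarbour : List String := ["Chembur","Govandi","Mankhurd"]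
def pvNavi : List String := ["Vashi","Airoli","Kopar Khairane","Ghansoli","Turbhe","Sanpada","Seawoods","Nerul","Belapur","Kharghar","Kamothe","Ulwe","New Panvel","Panvel","Taloja"]

-- A's helper _first_idx: enumerate loop, return first index whose lowered name occurs in a
def pvFirstIdx (a : String) : List String → Int → Option Int
  | [], _ => none
  | name :: rest, i =>
      if PySem.Str.isIn (PySem.Str.lower name) a then some i else pvFirstIdx a rest (i + 1)

def proximity_score (area : String) (region : String) : Int :=
  let a := PySem.Str.lower area   -- (area or "") = area for a str argument
  let r := PySem.Str.lower region
  if PySem.Str.isIn "south" r || pvSouth.any (fun k => PySem.Str.isIn (PySem.Str.lower k) a) then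
    match pvFirstIdx a pvSouth 0 with | some i => i | none => 0
  else if PySem.Str.isIn "western" r || pvWestern.any (fun k => PySem.Str.isIn (PySem.Str.lower k) a) then
    match pvFirstIdx a pvWestern 0 with | some i => i | none => 50
  else if PySem.Str.isIn "central" r || pvCentral.any (fun k => PySem.Str.isIn (PySem.Str.lower k) a) then
    match pvFirstIdx a pvCentral 0 with | some i => i | none => 50
  else if PySem.Str.isIn "harbour" r || PySem.Str.isIn "chembur" a then
    match pvFirstIdx a pvHarbour 0 with | some i => i | none => 30
  else if PySem.Str.isIn "navi" r || pvNavi.any (fun k => PySem.Str.isIn (PySem.Str.lower k) a) then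
    match pvFirstIdx a pvNavi 0 with | some i => i | none => 40
  else 60

-- ===== PORT B =====
-- _CATS: priority-ordered (keyword, name list, default)
def pvCats : List (String × List String × Int) :=
  [("south", pvSouth, 0), ("western", pvWestern, 50), ("central", pvCentral, 50),
   ("harbour", pvHarbour, 30), ("navi", pvNavi, 40)]

-- _FLAT: one flat keyword index (lowered name, category rank, index in its list)
def pvFlat : List (String × Nat × Int) :=
  (List.zipIdx pvCats).flatMap (fun p =>
    (List.zipIdx p.1.2.1).map (fun q => (PySem.Str.lower q.1, p.2, (q.2 : Int))))

-- the body of B's flat scan: if c not in first and low in a: first[c] = i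
def pvStep (a : String) (d : PySem.Dict Nat Int) (t : String × Nat × Int) : PySem.Dict Nat Int :=
  if !(d.contains t.2.1) && PySem.Str.isIn t.1 a then d.insert t.2.1 t.2.2 else d

def proximity_score_alt (area : String) (region : String) : Int :=
  let a := PySem.Str.lower area
  let r := PySem.Str.lower region
  let first := pvFlat.foldl (pvStep a) PySem.Dict.empty
  let hits := ((List.zipIdx pvCats).filter (fun p =>
      PySem.Str.isIn p.1.1 r ||
        (if p.1.1 == "harbour" then PySem.Str.isIn "chembur" a else first.contains p.2))).map (fun p => p.2)
  match hits with
  | [] => 60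
  | c :: _ => first.getD c ((((PySem.List.pyGet? pvCats (c : Int)).map (fun t => t.2.2))).getD 0)

-- ===== PRECONDITION & SPEC =====
def Spec_proximity_score (area : String) (region : String) (out : Int) : Prop := out = proximity_score_alt area region
instance (area : String) (region : String) (out : Int) : Decidable (Spec_proximity_score area region out) := by unfold Spec_proximity_score; infer_instance

-- ===== CLAIM (what is proved, stated in full; the proofs are below) =====
def Claim_equal_proximity_score : Prop := ∀ (area : String) (region : String), Dom_proximity_score area region → Spec_proximity_score area region (proximity_score area region)

-- ===== LEMMAS AND PROOFS =====

-- the flat-scan dict, looked up at category c, is the first match among c's triples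
theorem pv_get_fold (a : String) (L : List (String × Nat × Int)) (d : PySem.Dict Nat Int) (c : Nat) :
    ((L.foldl (pvStep a) d).get? c) =
      ((d.get? c).or ((L.find? (fun t => t.2.1 == c && PySem.Str.isIn t.1 a)).map (fun t => t.2.2))) := by
  induction L generalizing d with
  | nil => simp
  | cons t L ih =>
      simp only [List.foldl_cons, List.find?_cons]
      rw [ih]
      simp only [pvStep]
      by_cases hc : t.2.1 = c
      · subst hc
        by_cases hi : PySem.Str.isIn t.1 a = true
        · simp only [hi, Bool.and_true, beq_self_eq_true]
          by_cases hd : d.contains t.2.1 = true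
          · have hs : (d.get? t.2.1).isSome := by
              rw [← PySem.Dict.contains_eq_isSome_get?]; exact hd
            obtain ⟨v, hv⟩ := Option.isSome_iff_exists.mp hs
            simp [hd, hv]
          · have hn : d.get? t.2.1 = none :=
              (PySem.Dict.get?_eq_none_iff_contains d t.2.1).mpr (Bool.eq_false_iff.mpr hd)
            simp only [Bool.eq_false_iff.mpr hd, Bool.not_false, if_true]
            rw [PySem.Dict.get?_insert_self, hn]
            simp
        · have hif : PySem.Str.isIn t.1 a = false := Bool.eq_false_iff.mpr hi
          simp only [hif, Bool.and_false, Bool.false_eq_true, if_false]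
      · have hb : (t.2.1 == c) = false := by simp [hc]
        simp only [hb, Bool.false_and]
        have hiq : (if (!d.contains t.2.1 && PySem.Str.isIn t.1 a) = true
              then d.insert t.2.1 t.2.2 else d).get? c = d.get? c := by
          split
          · exact PySem.Dict.get?_insert_of_ne d _ (Ne.symm hc)
          · rfl
        rw [hiq]

-- pvFirstIdx finds something iff some lowered name occurs in a
theorem pvFirstIdx_isSome (a : String) (names : List String) (i : Int) :
    (pvFirstIdx a names i).isSome = names.any (fun k => PySem.Str.isIn (PySem.Str.lower k) a) := by
  induction names generalizing i with
  | nil => rfl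
  | cons n rest ih =>
      simp only [pvFirstIdx, List.any_cons]
      split_ifs with h
      · simp only [h, Option.isSome_some, Bool.true_or]
      · rw [Bool.eq_false_iff.mpr h, Bool.false_or]; exact ih (i + 1)

-- find? over one category block with the matching rank is _first_idx on that list
theorem pvBlk_find_eq (a : String) (c : Nat) (names : List String) (k : Nat) :
    (((List.zipIdx names k).map (fun q => (PySem.Str.lower q.1, c, (q.2 : Int)))).find?
        (fun t => t.2.1 == c && PySem.Str.isIn t.1 a)).map (fun t => t.2.2)
      = pvFirstIdx a names (k : Int) := by
  induction names generalizing k with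
  | nil => rfl
  | cons n rest ih =>
      simp only [List.zipIdx_cons, List.map_cons, List.find?_cons, pvFirstIdx,
        beq_self_eq_true, Bool.true_and]
      by_cases h : PySem.Str.isIn (PySem.Str.lower n) a = true
      · rw [h]; rfl
      · rw [Bool.eq_false_iff.mpr h]
        simp only [if_false, Bool.false_eq_true]
        rw [ih (k + 1)]
        push_cast
        rfl

-- find? over a block with a different rank finds nothing
theorem pvBlk_find_ne (a : String) (c c' : Nat) (h : (c' == c) = false) (names : List String) (k : Nat) :
    ((List.zipIdx names k).map (fun q => (PySem.Str.lower q.1, c', (q.2 : Int)))).find?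
        (fun t => t.2.1 == c && PySem.Str.isIn t.1 a) = none := by
  induction names generalizing k with
  | nil => rfl
  | cons n rest ih =>
      simp only [List.zipIdx_cons, List.map_cons, List.find?_cons, h, Bool.false_and]
      exact ih (k + 1)

-- ===== VERDICT (by name: the statement is the Claim_ definition above) =====
theorem proximity_score_spec : Claim_equal_proximity_score := by
  intro area region _
  unfold Spec_proximity_score proximity_score proximity_score_alt
  set a := PySem.Str.lower area with ha
  set r := PySem.Str.lower region with hr
  have hflat : pvFlat =
      ((List.zipIdx pvSouth).map (fun q => (PySem.Str.lower q.1, 0, (q.2 : Int)))) ++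
      (((List.zipIdx pvWestern).map (fun q => (PySem.Str.lower q.1, 1, (q.2 : Int)))) ++
      (((List.zipIdx pvCentral).map (fun q => (PySem.Str.lower q.1, 2, (q.2 : Int)))) ++
      (((List.zipIdx pvHarbour).map (fun q => (PySem.Str.lower q.1, 3, (q.2 : Int)))) ++
      ((List.zipIdx pvNavi).map (fun q => (PySem.Str.lower q.1, 4, (q.2 : Int))))))) := rfl
  have g : ∀ c : Nat, ∀ names : List String,
      (List.find? (fun t => t.2.1 == c && PySem.Str.isIn t.1 a)
          ((List.zipIdx names).map (fun q => (PySem.Str.lower q.1, c, (q.2 : Int))))).map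
        (fun t => t.2.2) = pvFirstIdx a names 0 := by
    intro c names
    have := pvBlk_find_eq a c names 0
    simpa using this
  have g0 : (pvFlat.foldl (pvStep a) PySem.Dict.empty).get? 0 = pvFirstIdx a pvSouth 0 := by
    rw [pv_get_fold, hflat]
    simp only [List.find?_append,
      pvBlk_find_ne a 0 1 (by decide), pvBlk_find_ne a 0 2 (by decide),
      pvBlk_find_ne a 0 3 (by decide), pvBlk_find_ne a 0 4 (by decide),
      Option.or_none, Option.none_or, PySem.Dict.get?_empty]
    exact g 0 pvSouth
  have g1 : (pvFlat.foldl (pvStep a) PySem.Dict.empty).get? 1 = pvFirstIdx a pvWestern 0 := by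
    rw [pv_get_fold, hflat]
    simp only [List.find?_append,
      pvBlk_find_ne a 1 0 (by decide), pvBlk_find_ne a 1 2 (by decide),
      pvBlk_find_ne a 1 3 (by decide), pvBlk_find_ne a 1 4 (by decide),
      Option.or_none, Option.none_or, PySem.Dict.get?_empty]
    exact g 1 pvWestern
  have g2 : (pvFlat.foldl (pvStep a) PySem.Dict.empty).get? 2 = pvFirstIdx a pvCentral 0 := by
    rw [pv_get_fold, hflat]
    simp only [List.find?_append,
      pvBlk_find_ne a 2 0 (by decide), pvBlk_find_ne a 2 1 (by decide),
      pvBlk_find_ne a 2 3 (by decide), pvBlk_find_ne a 2 4 (by decide),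
      Option.or_none, Option.none_or, PySem.Dict.get?_empty]
    exact g 2 pvCentral
  have g3 : (pvFlat.foldl (pvStep a) PySem.Dict.empty).get? 3 = pvFirstIdx a pvHarbour 0 := by
    rw [pv_get_fold, hflat]
    simp only [List.find?_append,
      pvBlk_find_ne a 3 0 (by decide), pvBlk_find_ne a 3 1 (by decide),
      pvBlk_find_ne a 3 2 (by decide), pvBlk_find_ne a 3 4 (by decide),
      Option.or_none, Option.none_or, PySem.Dict.get?_empty]
    exact g 3 pvHarbour
  have g4 : (pvFlat.foldl (pvStep a) PySem.Dict.empty).get? 4 = pvFirstIdx a pvNavi 0 := by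
    rw [pv_get_fold, hflat]
    simp only [List.find?_append,
      pvBlk_find_ne a 4 0 (by decide), pvBlk_find_ne a 4 1 (by decide),
      pvBlk_find_ne a 4 2 (by decide), pvBlk_find_ne a 4 3 (by decide),
      Option.none_or, PySem.Dict.get?_empty]
    exact g 4 pvNavi
  have m0 : (pvFlat.foldl (pvStep a) PySem.Dict.empty).contains 0
      = pvSouth.any (fun k => PySem.Str.isIn (PySem.Str.lower k) a) := by
    rw [PySem.Dict.contains_eq_isSome_get?, g0, pvFirstIdx_isSome]
  have m1 : (pvFlat.foldl (pvStep a) PySem.Dict.empty).contains 1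
      = pvWestern.any (fun k => PySem.Str.isIn (PySem.Str.lower k) a) := by
    rw [PySem.Dict.contains_eq_isSome_get?, g1, pvFirstIdx_isSome]
  have m2 : (pvFlat.foldl (pvStep a) PySem.Dict.empty).contains 2
      = pvCentral.any (fun k => PySem.Str.isIn (PySem.Str.lower k) a) := by
    rw [PySem.Dict.contains_eq_isSome_get?, g2, pvFirstIdx_isSome]
  have m4 : (pvFlat.foldl (pvStep a) PySem.Dict.empty).contains 4
      = pvNavi.any (fun k => PySem.Str.isIn (PySem.Str.lower k) a) := by
    rw [PySem.Dict.contains_eq_isSome_get?, g4, pvFirstIdx_isSome]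
  have hcats : List.zipIdx pvCats =
      [(("south", pvSouth, (0:Int)), 0), (("western", pvWestern, 50), 1),
       (("central", pvCentral, 50), 2), (("harbour", pvHarbour, 30), 3),
       (("navi", pvNavi, 40), 4)] := rfl
  rw [hcats]
  simp only [List.filter_cons, List.filter_nil,
    show (("south":String) == "harbour") = false from rfl,
    show (("western":String) == "harbour") = false from rfl,
    show (("central":String) == "harbour") = false from rfl,
    show (("harbour":String) == "harbour") = true from rfl,
    show (("navi":String) == "harbour") = false from rfl,
    if_true, if_false, Bool.false_eq_true, m0, m1, m2, m4]
  by_cases h0 : (PySem.Str.isIn "south" r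
      || pvSouth.any (fun k => PySem.Str.isIn (PySem.Str.lower k) a)) = true
  · simp only [h0, if_true, List.map_cons]
    rw [PySem.Dict.getD_eq_get?_getD, g0]
    cases hf : pvFirstIdx a pvSouth 0 <;> rfl
  · rw [Bool.not_eq_true] at h0
    simp only [h0, Bool.false_eq_true, if_false]
    by_cases h1 : (PySem.Str.isIn "western" r
        || pvWestern.any (fun k => PySem.Str.isIn (PySem.Str.lower k) a)) = true
    · simp only [h1, if_true, List.map_cons]
      rw [PySem.Dict.getD_eq_get?_getD, g1]
      cases hf : pvFirstIdx a pvWestern 0 <;> rfl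
    · rw [Bool.not_eq_true] at h1
      simp only [h1, Bool.false_eq_true, if_false]
      by_cases h2 : (PySem.Str.isIn "central" r
          || pvCentral.any (fun k => PySem.Str.isIn (PySem.Str.lower k) a)) = true
      · simp only [h2, if_true, List.map_cons]
        rw [PySem.Dict.getD_eq_get?_getD, g2]
        cases hf : pvFirstIdx a pvCentral 0 <;> rfl
      · rw [Bool.not_eq_true] at h2
        simp only [h2, Bool.false_eq_true, if_false]
        by_cases h3 : (PySem.Str.isIn "harbour" r || PySem.Str.isIn "chembur" a) = true
        · simp only [h3, if_true, List.map_cons]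
          rw [PySem.Dict.getD_eq_get?_getD, g3]
          cases hf : pvFirstIdx a pvHarbour 0 <;> rfl
        · rw [Bool.not_eq_true] at h3
          simp only [h3, Bool.false_eq_true, if_false]
          by_cases h4 : (PySem.Str.isIn "navi" r
              || pvNavi.any (fun k => PySem.Str.isIn (PySem.Str.lower k) a)) = true
          · simp only [h4, if_true, List.map_cons]
            rw [PySem.Dict.getD_eq_get?_getD, g4]
            cases hf : pvFirstIdx a pvNavi 0 <;> rfl
          · rw [Bool.not_eq_true] at h4
            simp only [h4, Bool.false_eq_true, if_false, List.map_nil]
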